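-- pv_equiv track=rewrite | github.com/keikosanjo/lesson | python/problem22.py | calculate_list_score
-- ===== SOURCE A (Python) =====
-- score = ["A","B","C","D","E","F","G","H","I", "J","K","L","M","N","O","P","Q","R","S","T","U","V","W","X","Y","Z"]
--
-- def calculate_list_score(name):
--     name_score = 0
--     str_list = list(name)
--     for i in range(0,len(str_list)):
--         for j in range(0,len(score)):
--             if str_list[i] == score[j]:
--                 name_score += (j+1)
--     return(name_score)
-- ===== SOURCE B (Python) =====
-- def calculate_list_score(name):
--     return sum(ord(c) - 64 for c in name if 'A' <= c <= 'Z')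
-- ===== Notes on version B (the rewrite author's own statement) =====
-- stated objective: faster
-- what changed: Replaced the inner scan over the 26-element alphabet list (matching each character against every letter to find its index) with a single pass computing each uppercase letter's position arithmetically as ord(c)-64 under a range guard.
import Mathlib
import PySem

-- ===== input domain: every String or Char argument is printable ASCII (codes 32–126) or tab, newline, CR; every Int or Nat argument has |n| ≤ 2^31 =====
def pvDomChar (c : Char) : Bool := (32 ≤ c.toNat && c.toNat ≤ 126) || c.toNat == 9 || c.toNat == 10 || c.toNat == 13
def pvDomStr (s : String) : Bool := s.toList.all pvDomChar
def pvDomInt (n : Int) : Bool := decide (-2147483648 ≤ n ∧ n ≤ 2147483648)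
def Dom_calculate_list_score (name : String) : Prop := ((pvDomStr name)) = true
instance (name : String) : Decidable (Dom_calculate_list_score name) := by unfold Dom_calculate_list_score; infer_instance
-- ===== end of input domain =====

-- B replaces A's inner scan over the 26-letter alphabet list with a single pass adding ord(c)-64 for uppercase letters.

-- ===== PORT A =====
def pvScore : List Char := ['A','B','C','D','E','F','G','H','I','J','K','L','M','N','O','P','Q','R','S','T','U','V','W','X','Y','Z']

def calculate_list_score (name : String) : Int :=
  let str_list := name.toList
  List.foldl
    (fun name_score i =>
      List.foldl
        (fun ns j =>
          if PySem.List.pyGetD str_list i ' ' = PySem.List.pyGetD pvScore j ' ' then ns + (j + 1) else ns)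
        name_score (PySem.List.pyRange 0 (PySem.List.len pvScore)))
    0 (PySem.List.pyRange 0 (PySem.List.len str_list))

-- ===== PORT B =====
def calculate_list_score_alt (name : String) : Int :=
  ((name.toList.filter (fun c => 'A' ≤ c && c ≤ 'Z')).map (fun c => (c.toNat : Int) - 64)).sum

-- ===== PRECONDITION & SPEC =====
def Spec_calculate_list_score (name : String) (out : Int) : Prop := out = calculate_list_score_alt name
instance (name : String) (out : Int) : Decidable (Spec_calculate_list_score name out) := by unfold Spec_calculate_list_score; infer_instance

-- ===== CLAIM (what is proved, stated in full; the proofs are below) =====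
def Claim_equal_calculate_list_score : Prop := ∀ (name : String), Dom_calculate_list_score name → Spec_calculate_list_score name (calculate_list_score name)

-- ===== LEMMAS AND PROOFS =====

theorem pv_range_iff (c : Char) : ('A' ≤ c && c ≤ 'Z') = true ↔ (65 ≤ c.toNat ∧ c.toNat ≤ 90) := by
  simp [Char.le_def, UInt32.le_iff_toNat_le]

-- The per-character contribution of A's inner scan, written as a sum over the alphabet indices,
-- is the letter's alphabetical position (and 0 for a non-uppercase character).
theorem pv_inner_sum (c : Char) :
    (List.map (fun j => if c = PySem.List.pyGetD pvScore j ' ' then j + 1 else 0)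
      (PySem.List.pyRange 0 (PySem.List.len pvScore))).sum
    = (if 65 ≤ c.toNat ∧ c.toNat ≤ 90 then (c.toNat : Int) - 64 else 0) := by
  by_cases hc : 65 ≤ c.toNat ∧ c.toNat ≤ 90
  · obtain ⟨h1, h2⟩ := hc
    have hc2 : c = Char.ofNat c.toNat := (Char.ofNat_toNat c).symm
    interval_cases h : c.toNat <;> (subst hc2; decide)
  · have hne : ∀ (d : Char), 65 ≤ d.toNat → d.toNat ≤ 90 → (c = d) = False := by
      intro d h1 h2
      simp only [eq_iff_iff, iff_false]
      intro h; exact hc (h ▸ ⟨h1, h2⟩)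
    have hr : PySem.List.pyRange 0 (PySem.List.len pvScore) = [0, 1, 2, 3, 4, 5, 6, 7, 8, 9, 10, 11, 12, 13, 14, 15, 16, 17, 18, 19, 20, 21, 22, 23, 24, 25] := by decide
    rw [hr, if_neg hc]
    simp only [List.map_cons, List.map_nil, show PySem.List.pyGetD pvScore 0 ' ' = 'A' from by decide, show PySem.List.pyGetD pvScore 1 ' ' = 'B' from by decide, show PySem.List.pyGetD pvScore 2 ' ' = 'C' from by decide, show PySem.List.pyGetD pvScore 3 ' ' = 'D' from by decide, show PySem.List.pyGetD pvScore 4 ' ' = 'E' from by decide, show PySem.List.pyGetD pvScore 5 ' ' = 'F' from by decide, show PySem.List.pyGetD pvScore 6 ' ' = 'G' from by decide, show PySem.List.pyGetD pvScore 7 ' ' = 'H' from by decide, show PySem.List.pyGetD pvScore 8 ' ' = 'I' from by decide, show PySem.List.pyGetD pvScore 9 ' ' = 'J' from by decide, show PySem.List.pyGetD pvScore 10 ' ' = 'K' from by decide, show PySem.List.pyGetD pvScore 11 ' ' = 'L' from by decide, show PySem.List.pyGetD pvScore 12 ' ' = 'M' from by decide, show PySem.List.pyGetD pvScore 13 ' '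 = 'N' from by decide, show PySem.List.pyGetD pvScore 14 ' ' = 'O' from by decide, show PySem.List.pyGetD pvScore 15 ' ' = 'P' from by decide, show PySem.List.pyGetD pvScore 16 ' ' = 'Q' from by decide, show PySem.List.pyGetD pvScore 17 ' ' = 'R' from by decide, show PySem.List.pyGetD pvScore 18 ' ' = 'S' from by decide, show PySem.List.pyGetD pvScore 19 ' ' = 'T' from by decide, show PySem.List.pyGetD pvScore 20 ' ' = 'U' from by decide, show PySem.List.pyGetD pvScore 21 ' ' = 'V' from by decide, show PySem.List.pyGetD pvScore 22 ' ' = 'W' from by decide, show PySem.List.pyGetD pvScore 23 ' ' = 'X' from by decide, show PySem.List.pyGetD pvScore 24 ' ' = 'Y' from by decide, show PySem.List.pyGetD pvScore 25 ' ' = 'Z' from by decide, hne 'A' (by decide) (by decide), hne 'B' (by decide) (by decide), hne 'C' (by decide) (by decide), hne 'D' (by decide) (by decide), hne 'E' (by decide) (by decide), hne 'F' (by decide) (by decide), hne 'G' (by decide) (by decide), hne 'H' (by decide) (by decide), hne 'I' (by decide) (by decide), hne 'J' (by decide) (by decide), hne 'K' (by decide) (by decide), hne 'L' (by decide) (by decide),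 hne 'M' (by decide) (by decide), hne 'N' (by decide) (by decide), hne 'O' (by decide) (by decide), hne 'P' (by decide) (by decide), hne 'Q' (by decide) (by decide), hne 'R' (by decide) (by decide), hne 'S' (by decide) (by decide), hne 'T' (by decide) (by decide), hne 'U' (by decide) (by decide), hne 'V' (by decide) (by decide), hne 'W' (by decide) (by decide), hne 'X' (by decide) (by decide), hne 'Y' (by decide) (by decide), hne 'Z' (by decide) (by decide), if_false, List.sum_cons, List.sum_nil,
      add_zero]

-- A's inner fold equals the accumulator plus that per-character contribution.
theorem pv_inner (c : Char) (ns : Int) :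
    List.foldl
      (fun ns j => if c = PySem.List.pyGetD pvScore j ' ' then ns + (j + 1) else ns)
      ns (PySem.List.pyRange 0 (PySem.List.len pvScore))
    = ns + (if 65 ≤ c.toNat ∧ c.toNat ≤ 90 then (c.toNat : Int) - 64 else 0) := by
  rw [← pv_inner_sum c]
  have hstep : (fun (ns j : Int) => if c = PySem.List.pyGetD pvScore j ' ' then ns + (j + 1) else ns)
      = fun ns j => ns + (if c = PySem.List.pyGetD pvScore j ' ' then j + 1 else 0) := by
    funext ns j; split <;> simp
  rw [hstep, PySem.List.foldl_add]

theorem pv_sum_filter (l : List Char) :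
    (l.map (fun c => if 65 ≤ c.toNat ∧ c.toNat ≤ 90 then (c.toNat : Int) - 64 else 0)).sum
    = ((l.filter (fun c => 'A' ≤ c && c ≤ 'Z')).map (fun c => (c.toNat : Int) - 64)).sum := by
  induction l with
  | nil => rfl
  | cons c t ih =>
    by_cases hc : 65 ≤ c.toNat ∧ c.toNat ≤ 90
    · have hb : ('A' ≤ c && c ≤ 'Z') = true := (pv_range_iff c).mpr hc
      simp [hb, hc, ih]
    · have hb : ('A' ≤ c && c ≤ 'Z') = false := by
        rw [← Bool.not_eq_true]; intro h; exact hc ((pv_range_iff c).mp h)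
      simp [hb, hc, ih]

-- ===== VERDICT (by name: the statement is the Claim_ definition above) =====
theorem calculate_list_score_spec : Claim_equal_calculate_list_score := by
  intro name _
  unfold Spec_calculate_list_score calculate_list_score calculate_list_score_alt
  rw [PySem.List.foldl_pyRange_zero_pyGetD name.toList ' '
    (fun ns c => List.foldl (fun ns j => if c = PySem.List.pyGetD pvScore j ' ' then ns + (j + 1) else ns)
      ns (PySem.List.pyRange 0 (PySem.List.len pvScore))) 0]
  have hf : (fun (ns : Int) (c : Char) =>
      List.foldl (fun ns j => if c = PySem.List.pyGetD pvScore j ' ' then ns + (j + 1) else ns)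
        ns (PySem.List.pyRange 0 (PySem.List.len pvScore)))
      = fun ns c => ns + (if 65 ≤ c.toNat ∧ c.toNat ≤ 90 then (c.toNat : Int) - 64 else 0) := by
    funext ns c; exact pv_inner c ns
  rw [hf, PySem.List.foldl_add, pv_sum_filter]
  ring
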